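-- pv_equiv track=rewrite | github.com/Parag-code/travel_app | itinerary.py | split_days_among_cities
-- ===== SOURCE A (Python) =====
-- def split_days_among_cities(cities, total_days):
--     city_day_counts = {}
--     n = len(cities)
--     min_days = 2 if total_days >= n * 2 else 1
--     for c in cities:
--         city_day_counts[c] = min_days
--     remaining_days = total_days - (min_days * n)
--     idx = 0
--     while remaining_days > 0:
--         city_day_counts[cities[idx % n]] += 1
--         remaining_days -= 1
--         idx += 1
--     return city_day_counts
-- ===== SOURCE B (Python) =====
-- def split_days_among_cities(cities, total_days):
--     n = len(cities)
--     if n == 0: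
--         return {}
--     min_days = 2 if total_days >= n * 2 else 1
--     remaining = total_days - min_days * n
--     if remaining < 0:
--         remaining = 0
--     q, r = divmod(remaining, n)
--     counts = {}
--     for i, c in enumerate(cities):
--         extra = q + (1 if i < r else 0)
--         counts[c] = counts.get(c, min_days) + extra
--     return counts
-- ===== Notes on version B (the rewrite author's own statement) =====
-- stated objective: alternative
-- what changed: Replaces A's day-by-day while loop that hands out one day per iteration with a closed-form div/mod distribution: base share q = remaining // n for every city position, one extra day for the first remaining % n positions, computed in a single pass over the cities.
import Mathlib
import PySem

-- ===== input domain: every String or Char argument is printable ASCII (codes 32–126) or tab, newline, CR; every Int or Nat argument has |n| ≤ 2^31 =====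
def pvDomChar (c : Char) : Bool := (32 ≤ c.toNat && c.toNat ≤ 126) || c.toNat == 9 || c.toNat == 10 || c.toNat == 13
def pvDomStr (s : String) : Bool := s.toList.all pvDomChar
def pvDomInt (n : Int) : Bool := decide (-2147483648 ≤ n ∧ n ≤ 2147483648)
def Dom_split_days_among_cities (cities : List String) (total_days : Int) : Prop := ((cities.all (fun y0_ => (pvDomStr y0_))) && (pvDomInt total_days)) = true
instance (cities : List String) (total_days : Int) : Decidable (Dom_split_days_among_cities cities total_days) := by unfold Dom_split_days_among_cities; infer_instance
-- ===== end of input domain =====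

-- B replaces A's day-by-day while loop by the closed-form div/mod round-robin
-- distribution: base share q = remaining // n for every city position, and the first
-- remaining % n positions get one extra day.

-- ===== PORT A =====
-- A's `while remaining_days > 0` loop.  `city_day_counts[cities[idx % n]] += 1` is ported as
-- Dict.modify with default 0; the default is never read, since the key is an element of `cities`
-- and hence always present in the dict.  The unreachable `.getD ""` covers pyGet?'s none case.
def splitLoopA (cities : List String) (n : Int) (d : PySem.Dict String Int)
    (remaining idx : Int) : PySem.Dict String Int :=
  if 0 < remaining then
    let c := (PySem.List.pyGet? cities (PySem.Int.mod idx n)).getD ""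
    splitLoopA cities n (d.modify c 0 (· + 1)) (remaining - 1) (idx + 1)
  else d
termination_by remaining.toNat
decreasing_by omega

def split_days_among_cities (cities : List String) (total_days : Int) : List (String × Int) :=
  let n : Int := cities.length
  let min_days : Int := if total_days ≥ n * 2 then 2 else 1
  let d0 := cities.foldl (fun d c => d.insert c min_days) PySem.Dict.empty
  let remaining_days := total_days - min_days * n
  (splitLoopA cities n d0 remaining_days 0).items

-- ===== PORT B =====
def split_days_among_cities_alt (cities : List String) (total_days : Int) : List (String × Int) :=
  let n : Int := cities.length
  if n = 0 then []
  else
    let min_days : Int := if total_days ≥ n * 2 then 2 else 1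
    let remaining0 := total_days - min_days * n
    let remaining := if remaining0 < 0 then 0 else remaining0
    let q := PySem.Int.floordiv remaining n
    let r := PySem.Int.mod remaining n
    (cities.zipIdx.foldl
      (fun (d : PySem.Dict String Int) ci =>
        let extra := q + (if (ci.2 : Int) < r then 1 else 0)
        d.insert ci.1 (d.getD ci.1 min_days + extra))
      PySem.Dict.empty).items

-- ===== PRECONDITION & SPEC =====
-- Pre_ excludes only the inputs where A raises: empty `cities` with total_days > 0
-- (ZeroDivisionError from `idx % n` with n = 0).
def Pre_split_days_among_cities (cities : List String) (total_days : Int) : Prop :=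
  cities = [] → total_days ≤ 0
instance (cities : List String) (total_days : Int) : Decidable (Pre_split_days_among_cities cities total_days) := by unfold Pre_split_days_among_cities; infer_instance
def pvWitness_split_days_among_cities : List String × Int := (["paris", "rome"], 5)

def Spec_split_days_among_cities (cities : List String) (total_days : Int) (out : List (String × Int)) : Prop := out = split_days_among_cities_alt cities total_days
instance (cities : List String) (total_days : Int) (out : List (String × Int)) : Decidable (Spec_split_days_among_cities cities total_days out) := by unfold Spec_split_days_among_cities; infer_instance

-- ===== CLAIM (what is proved, stated in full; the proofs are below) =====
def Claim_equal_split_days_among_cities : Prop := ∀ (cities : List String) (total_days : Int), Dom_split_days_among_cities cities total_days → Pre_split_days_among_cities cities total_days → Spec_split_days_among_cities cities total_days (split_days_among_cities cities total_days)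


-- ===== LEMMAS AND PROOFS =====

-- updating a set with elements it already contains is the identity
theorem pv_set_update_subset (l : List String) : ∀ (s : PySem.Set String),
    (∀ x ∈ l, s.contains x = true) → PySem.Set.update s l = s := by
  induction l with
  | nil => intro s _; rfl
  | cons c l ih =>
    intro s h
    have hc : PySem.Set.add s c = s := by
      have hcc : s.contains c = true := h c (by simp)
      unfold PySem.Set.add
      rw [if_pos hcc]
    show PySem.Set.update (PySem.Set.add s c) l = s
    rw [hc]
    exact ih s (fun x hx => h x (by simp [hx]))

-- A's while loop is the fold of `modify · 0 (+1)` over the round-robin key list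
theorem pv_loopA_eq (cities : List String) :
    ∀ (r : Nat) (idx : Nat) (d : PySem.Dict String Int),
    splitLoopA cities (cities.length : Int) d (r : Int) (idx : Int) =
      (((List.range r).map (fun t => cities.getD ((idx + t) % cities.length) "")).foldl
        (fun d c => d.modify c 0 (· + 1)) d) := by
  intro r
  induction r with
  | zero => intro idx d; rw [splitLoopA]; simp
  | succ r ih =>
    intro idx d
    rw [splitLoopA]
    rw [if_pos (by push_cast; omega : (0:Int) < ((r+1 : Nat) : Int))]
    have h1 : ((r+1:Nat):Int) - 1 = ((r:Nat):Int) := by push_cast; ring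
    have h2 : ((idx:Nat):Int) + 1 = ((idx+1:Nat):Int) := by push_cast; ring
    have hkey : (PySem.List.pyGet? cities (PySem.Int.mod ((idx:Nat):Int) ((cities.length:Nat):Int))).getD ""
        = cities.getD (idx % cities.length) "" := by
      rw [PySem.Int.mod_natCast, PySem.List.pyGet?_natCast, List.getD_eq_getElem?_getD]
    simp only [hkey, h1, h2]
    rw [ih (idx+1)]
    rw [List.range_succ_eq_map]
    simp only [List.map_cons, List.map_map, List.foldl_cons, Nat.add_zero]
    congr 1
    apply List.map_congr_left
    intro t _
    have h3 : idx + (t+1) = (idx+1)+t := by omega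
    simp [Function.comp, h3]

-- value of the initial `d[c] = m` fold
theorem pv_getD_init (cs : List String) (m : Int) : ∀ (d : PySem.Dict String Int) (k : String),
    ((cs.foldl (fun d c => d.insert c m) d).getD k 0) = if k ∈ cs then m else d.getD k 0 := by
  induction cs with
  | nil => intro d k; simp
  | cons c cs ih =>
    intro d k
    show ((cs.foldl (fun d c => d.insert c m) (d.insert c m)).getD k 0) = _
    rw [ih]
    rw [PySem.Dict.getD_insert]
    by_cases h1 : k ∈ cs <;> by_cases h2 : k = c <;> simp [h1, h2]

-- value of B's fold at a key: the start value plus the extras of that key's occurrences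
theorem pv_getD_foldB (m : Int) (e : Nat → Int) (k : String) :
    ∀ (l : List (String × Nat)) (d : PySem.Dict String Int),
    ((l.foldl (fun d ci => d.insert ci.1 (d.getD ci.1 m + e ci.2)) d).getD k m) =
      d.getD k m + ((l.filter (fun ci => ci.1 == k)).map (fun ci => e ci.2)).sum := by
  intro l
  induction l with
  | nil => intro d; simp
  | cons ci l ih =>
    intro d
    show ((l.foldl _ (d.insert ci.1 (d.getD ci.1 m + e ci.2))).getD k m) = _
    rw [ih]
    rw [PySem.Dict.getD_insert]
    by_cases h : ci.1 = k
    · subst h; simp; ring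
    · simp [h, Ne.symm h]

-- B's filtered-zipIdx sum as a sum over positions
theorem pv_zipIdx_sum (e : Nat → Int) (k : String) :
    ∀ (cs : List String) (j : Nat),
    (((cs.zipIdx j).filter (fun ci => ci.1 == k)).map (fun ci => e ci.2)).sum =
      ((List.range cs.length).map (fun t => if cs.getD t "" == k then e (j + t) else 0)).sum := by
  intro cs
  induction cs with
  | nil => intro j; simp
  | cons c cs ih =>
    intro j
    rw [List.zipIdx_cons, List.filter_cons]
    rw [List.length_cons, List.range_succ_eq_map]
    simp only [List.map_cons, List.map_map, List.sum_cons, List.getD_cons_zero, Nat.add_zero]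
    have hmap : ((List.range cs.length).map ((fun t => if (c :: cs).getD t "" == k then e (j + t) else 0) ∘ Nat.succ)).sum
        = ((List.range cs.length).map (fun t => if cs.getD t "" == k then e ((j+1) + t) else 0)).sum := by
      congr 1
      apply List.map_congr_left
      intro t _
      have h3 : j + (t+1) = (j+1)+t := by omega
      simp [Function.comp, h3]
    rw [hmap, ← ih (j+1)]
    by_cases h : c == k <;> simp [h]

-- helper: bumping the `[i < r]` threshold by one adds exactly the term at i = r
theorem pv_sum_bump (P : Nat → Bool) (q : Nat) (rr n : Nat) (hr : rr < n) :
    (∑ i ∈ Finset.range n, (if P i then q + (if i < rr + 1 then 1 else 0) else 0)) =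
      (∑ i ∈ Finset.range n, (if P i then q + (if i < rr then 1 else 0) else 0)) +
        (if P rr then 1 else 0) := by
  have hcg : ∀ i ∈ Finset.range n, (if P i then q + (if i < rr + 1 then 1 else 0) else 0) =
      (if P i then q + (if i < rr then 1 else 0) else 0) + (if i = rr then (if P rr then 1 else 0) else 0) := by
    intro i _
    by_cases hir : i = rr
    · subst hir; by_cases hP : P i <;> simp [hP]
    · have hiff : i < rr + 1 ↔ i < rr := by omega
      by_cases hP : P i <;> simp [hP, hir, hiff]
  rw [Finset.sum_congr rfl hcg, Finset.sum_add_distrib]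
  congr 1
  rw [Finset.sum_ite_eq' (Finset.range n) rr (fun _ => if P rr then 1 else 0)]
  simp [Finset.mem_range, hr]

-- CORE: round-robin residue counting equals the q/r closed form
theorem pv_countP_mod (n : Nat) (hn : 0 < n) (P : Nat → Bool) : ∀ (R : Nat),
    (List.range R).countP (fun t => P (t % n)) =
      ∑ i ∈ Finset.range n, (if P i then R / n + (if i < R % n then 1 else 0) else 0) := by
  intro R
  induction R with
  | zero => simp
  | succ R ih =>
    rw [List.range_succ, List.countP_append, ih]
    simp only [List.countP_cons, List.countP_nil, Nat.zero_add]
    have hq := Nat.div_add_mod R n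
    have hrlt : R % n < n := Nat.mod_lt _ hn
    by_cases hc : R % n + 1 = n
    · have key : R + 1 = n * (R / n + 1) := by
        have h1 : R + 1 = n * (R / n) + n := by omega
        rw [h1]; ring
      have hdiv : (R+1)/n = R/n + 1 := by rw [key, Nat.mul_div_cancel_left _ hn]
      have hmod : (R+1)%n = 0 := by rw [key]; exact Nat.mul_mod_right n _
      rw [hdiv, hmod]
      have hcg : ∀ i ∈ Finset.range n, (if P i then R/n+1 + (if i < 0 then 1 else 0) else 0)
          = (if P i then R/n + (if i < R%n + 1 then 1 else 0) else 0) := by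
        intro i hi; rw [Finset.mem_range] at hi
        have h1 : i < R % n + 1 := by omega
        by_cases hP : P i <;> simp [hP, h1]
      rw [Finset.sum_congr rfl hcg, pv_sum_bump P (R/n) (R%n) n hrlt]
    · have hlt : R % n + 1 < n := by omega
      have key : R + 1 = n * (R/n) + (R%n + 1) := by omega
      have hdiv : (R+1)/n = R/n := by
        rw [key, Nat.mul_add_div hn, Nat.div_eq_of_lt hlt, Nat.add_zero]
      have hmod : (R+1)%n = R%n + 1 := by
        rw [key, Nat.mul_add_mod, Nat.mod_eq_of_lt hlt]
      rw [hdiv, hmod, pv_sum_bump P (R/n) (R%n) n hrlt]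

-- ===== VERDICT (by name: the statement is the Claim_ definition above) =====
theorem split_days_among_cities_spec : Claim_equal_split_days_among_cities := by
  intro cities total_days _ hpre
  unfold Spec_split_days_among_cities
  by_cases hnil : cities = []
  · subst hnil
    have ht := hpre rfl
    simp only [split_days_among_cities, split_days_among_cities_alt, List.length_nil,
      Nat.cast_zero, mul_zero, sub_zero, List.foldl_nil]
    rw [splitLoopA, if_neg (not_lt.mpr ht)]
    simp
    rfl
  · have hn : 0 < cities.length := List.length_pos_iff.mpr hnil
    have hne : ¬ ((cities.length : Int) = 0) := by
      have : (0:Int) < (cities.length : Int) := by exact_mod_cast hn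
      omega
    simp only [split_days_among_cities, split_days_among_cities_alt]
    rw [if_neg hne]
    set M : Int := if total_days ≥ (cities.length:Int) * 2 then 2 else 1 with hM
    set R : Int := total_days - M * (cities.length:Int) with hR
    set Rn : Nat := R.toNat with hRn
    set d0 := List.foldl (fun (d : PySem.Dict String Int) c => d.insert c M) PySem.Dict.empty cities with hd0
    have hclamp : (if R < 0 then (0:Int) else R) = ((Rn:Nat):Int) := by
      rw [hRn]; split_ifs <;> omega
    rw [hclamp, PySem.Int.floordiv_natCast, PySem.Int.mod_natCast]
    set keylist := (List.range Rn).map (fun t => cities.getD (t % cities.length) "") with hkl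
    -- A's loop as a fold over the round-robin key list
    have hA : splitLoopA cities (cities.length:Int) d0 R 0
        = List.foldl (fun d c => d.modify c 0 (· + 1)) d0 keylist := by
      by_cases h : 0 < R
      case neg =>
        have hz : Rn = 0 := by omega
        rw [splitLoopA, if_neg h, hkl, hz]
        simp
      case pos =>
        have hRcast : R = ((Rn : Nat) : Int) := by omega
        have h2 := pv_loopA_eq cities Rn 0 d0
        simp only [Nat.cast_zero, Nat.zero_add] at h2
        rw [hRcast, h2, hkl]
    -- every round-robin key is a city
    have hcont : ∀ x ∈ keylist, (PySem.Set.ofList cities).contains x = true := by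
      intro x hx
      rw [hkl] at hx
      obtain ⟨t, -, rfl⟩ := List.mem_map.mp hx
      have hlt : t % cities.length < cities.length := Nat.mod_lt _ hn
      have hmem : cities.getD (t % cities.length) "" ∈ cities := by
        rw [List.getD_eq_getElem?_getD, List.getElem?_eq_getElem hlt]
        exact List.getElem_mem _
      exact List.elem_eq_true_of_mem ((PySem.Set.mem_ofList cities _).mpr hmem)
    have hkeysA : (List.foldl (fun d c => d.modify c 0 (· + 1)) d0 keylist).keys
        = PySem.Set.ofList cities := by
      rw [PySem.Dict.keys_foldl_modify keylist 0 (fun _ _ => (· + 1)) d0]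
      have hkd0 : d0.keys = PySem.Set.ofList cities := by
        rw [hd0, PySem.Dict.keys_foldl_insert cities (fun _ _ => M) PySem.Dict.empty]
        rfl
      rw [hkd0, pv_set_update_subset keylist _ hcont]
    have hndA : (List.foldl (fun d c => d.modify c 0 (· + 1)) d0 keylist).keys.Nodup := by
      rw [hkeysA]; exact PySem.Set.nodup_ofList cities
    have hitemsA : (List.foldl (fun d c => d.modify c 0 (· + 1)) d0 keylist).items
        = (PySem.Set.ofList cities).map (fun k => (k, M + (keylist.count k : Int))) := by
      rw [PySem.Dict.items_eq_map_keys _ hndA 0, hkeysA]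
      apply List.map_congr_left
      intro k hk
      have hk' : k ∈ cities := (PySem.Set.mem_ofList cities k).mp hk
      rw [PySem.Dict.getD_foldl_modify_add_one keylist d0 k, hd0,
        pv_getD_init cities M PySem.Dict.empty k]
      simp [hk']
    -- B's fold
    have hndB : (List.foldl (fun (d : PySem.Dict String Int) ci =>
          d.insert ci.1 (d.getD ci.1 M + (((Rn / cities.length : Nat):Int)
            + if (ci.2:Int) < ((Rn % cities.length : Nat):Int) then 1 else 0)))
          PySem.Dict.empty cities.zipIdx).keys.Nodup := by
      exact PySem.Dict.nodup_keys_foldl_insert_key cities.zipIdx Prod.fst _ PySem.Dict.empty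
        List.nodup_nil
    have hkeysB : (List.foldl (fun (d : PySem.Dict String Int) ci =>
          d.insert ci.1 (d.getD ci.1 M + (((Rn / cities.length : Nat):Int)
            + if (ci.2:Int) < ((Rn % cities.length : Nat):Int) then 1 else 0)))
          PySem.Dict.empty cities.zipIdx).keys = PySem.Set.ofList cities := by
      rw [PySem.Dict.keys_foldl_insert_key cities.zipIdx Prod.fst _ PySem.Dict.empty,
        List.zipIdx_map_fst]
      rfl
    have hitemsB : (List.foldl (fun (d : PySem.Dict String Int) ci =>
          d.insert ci.1 (d.getD ci.1 M + (((Rn / cities.length : Nat):Int)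
            + if (ci.2:Int) < ((Rn % cities.length : Nat):Int) then 1 else 0)))
          PySem.Dict.empty cities.zipIdx).items
        = (PySem.Set.ofList cities).map (fun k => (k, M +
            ((List.range cities.length).map (fun t => if cities.getD t "" == k
              then (((Rn / cities.length : Nat):Int)
                + if (t:Int) < ((Rn % cities.length : Nat):Int) then 1 else 0)
              else 0)).sum)) := by
      rw [PySem.Dict.items_eq_map_keys _ hndB M, hkeysB]
      apply List.map_congr_left
      intro k hk
      have h1 := pv_getD_foldB M (fun t => (((Rn / cities.length : Nat):Int)
        + if (t:Int) < ((Rn % cities.length : Nat):Int) then 1 else 0)) k cities.zipIdx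
        PySem.Dict.empty
      have h2 := pv_zipIdx_sum (fun t => (((Rn / cities.length : Nat):Int)
        + if (t:Int) < ((Rn % cities.length : Nat):Int) then 1 else 0)) k cities 0
      beta_reduce at h1 h2
      rw [h2] at h1
      simp only [Nat.zero_add] at h1
      rw [h1]
      rfl
    rw [hA, hitemsA, hitemsB]
    apply List.map_congr_left
    intro k hk
    have hk' : k ∈ cities := (PySem.Set.mem_ofList cities k).mp hk
    have hcount : (keylist.count k : Int)
        = ((List.range cities.length).map (fun t => if cities.getD t "" == k
              then (((Rn / cities.length : Nat):Int)
                + if (t:Int) < ((Rn % cities.length : Nat):Int) then 1 else 0)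
              else 0)).sum := by
      rw [hkl, List.count_eq_countP, List.countP_map]
      simp only [Function.comp_def]
      have hcp := pv_countP_mod cities.length hn (fun i => cities.getD i "" == k) Rn
      beta_reduce at hcp
      rw [hcp]
      have hbr : ∀ (f : Nat → Int), ((List.range cities.length).map f).sum
          = ∑ i ∈ Finset.range cities.length, f i := fun f => rfl
      rw [hbr, Nat.cast_sum]
      apply Finset.sum_congr rfl
      intro i _
      by_cases hP : (cities.getD i "" == k) = true
      · simp only [if_pos hP]
        by_cases hlt : i < Rn % cities.length
        · rw [if_pos hlt,
            if_pos (show (i:Int) < ((Rn % cities.length : Nat):Int) from by exact_mod_cast hlt)]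
          push_cast
          ring
        · rw [if_neg hlt,
            if_neg (show ¬ ((i:Int) < ((Rn % cities.length : Nat):Int)) from by exact_mod_cast hlt)]
          push_cast
          ring
      · simp only [if_neg hP]
        rfl
    rw [hcount]
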